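-- pv_equiv track=rewrite | github.com/jbkinney/poolparty-statetracker | poolparty/legacy/v0/legacy_tests/test_barcode_pool.py | _get_max_run
-- ===== SOURCE A (Python) =====
-- def _get_max_run(seq: str) -> int:
--     """Get the maximum homopolymer run length in a sequence."""
--     if not seq:
--         return 0
--     max_run = 1
--     current_run = 1
--     for i in range(1, len(seq)):
--         if seq[i] == seq[i-1]:
--             current_run += 1
--             max_run = max(max_run, current_run)
--         else:
--             current_run = 1
--     return max_run
-- ===== SOURCE B (Python) =====
-- def _get_max_run(seq: str) -> int:
--     """Get the maximum homopolymer run length in a sequence."""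
--     n = len(seq)
--     cuts = [0] + [i for i in range(1, n) if seq[i] != seq[i - 1]] + [n]
--     return max(b - a for a, b in zip(cuts, cuts[1:]))
-- ===== Notes on version B (the rewrite author's own statement) =====
-- stated objective: alternative
-- what changed: B computes the list of run-boundary positions (indices where adjacent characters differ, plus 0 and len(seq)) and returns the maximum gap between consecutive boundaries, instead of tracking current_run/max_run counters in a single explicit loop.
import Mathlib
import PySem

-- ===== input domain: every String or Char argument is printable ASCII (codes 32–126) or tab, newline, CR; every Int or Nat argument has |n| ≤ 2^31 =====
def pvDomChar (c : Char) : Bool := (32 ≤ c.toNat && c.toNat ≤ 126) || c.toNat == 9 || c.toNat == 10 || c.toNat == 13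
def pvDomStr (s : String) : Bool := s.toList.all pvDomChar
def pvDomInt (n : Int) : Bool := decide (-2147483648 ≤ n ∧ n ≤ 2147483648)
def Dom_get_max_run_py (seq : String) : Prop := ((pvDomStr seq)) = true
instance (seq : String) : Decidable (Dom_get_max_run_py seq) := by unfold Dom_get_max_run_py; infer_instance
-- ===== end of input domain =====

-- B computes the list of run-boundary positions (indices where adjacent characters differ,
-- plus 0 and len) and returns the maximum gap between consecutive boundaries, instead of
-- A's current_run/max_run counters (alternative decomposition; same O(n) cost).


-- ===== PORT A =====
-- seq[i] / seq[i-1] are always in range (1 ≤ i < len seq), so pyGetD with an arbitrary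
-- default is exact for Python's indexing here.
def get_max_run_py (seq : String) : Int :=
  if PySem.Str.len seq = 0 then 0
  else
    ((PySem.List.pyRange 1 (PySem.Str.len seq) 1).foldl
      (fun (st : Int × Int) i =>
        if PySem.List.pyGetD seq.toList i ' ' = PySem.List.pyGetD seq.toList (i - 1) ' ' then
          (max st.1 (st.2 + 1), st.2 + 1)
        else (st.1, 1))
      (1, 1)).1

-- ===== PORT B =====
-- cuts = [0] + [i for i in range(1, n) if seq[i] != seq[i-1]] + [n];
-- max(b - a for a, b in zip(cuts, cuts[1:]))  — cuts always has ≥ 2 elements, so the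
-- generator is nonempty; max(<nonempty>) is PySem.List.max? with the identity key.
def get_max_run_py_alt (seq : String) : Int :=
  let n : Int := PySem.Str.len seq
  let cuts : List Int :=
    0 :: ((PySem.List.pyRange 1 n 1).filter
      (fun i => PySem.List.pyGetD seq.toList i ' ' ≠ PySem.List.pyGetD seq.toList (i - 1) ' '))
      ++ [n]
  match PySem.List.max? ((cuts.zip cuts.tail).map (fun p => p.2 - p.1)) (fun x => x) with
  | some m => m
  | none => 0

-- ===== PRECONDITION & SPEC =====
def Spec_get_max_run_py (seq : String) (out : Int) : Prop := out = get_max_run_py_alt seq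
instance (seq : String) (out : Int) : Decidable (Spec_get_max_run_py seq out) := by unfold Spec_get_max_run_py; infer_instance

-- ===== CLAIM (what is proved, stated in full; the proofs are below) =====
def Claim_equal_get_max_run_py : Prop := ∀ (seq : String), Dom_get_max_run_py seq → Spec_get_max_run_py seq (get_max_run_py seq)

-- ===== LEMMAS AND PROOFS =====

-- A's loop, written as structural recursion over the tail of the list: prev is the previous
-- character, (maxr, cur) the loop state.
def pvLoopA (prev : Char) (maxr cur : Int) : List Char → Int
  | [] => maxr
  | x :: r => if x = prev then pvLoopA x (max maxr (cur + 1)) (cur + 1) r else pvLoopA x maxr 1 r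

-- The run lengths of prev :: t, given that the current run already has length n.
def pvGroupLens (prev : Char) (n : Int) : List Char → List Int
  | [] => [n]
  | x :: r => if x = prev then pvGroupLens prev (n + 1) r else n :: pvGroupLens x 1 r

-- B's interior cut positions, as structural recursion: i is the index of x in the full list.
def pvIdxCuts (i : Int) (prev : Char) : List Char → List Int
  | [] => []
  | x :: r => if x = prev then pvIdxCuts (i + 1) x r else i :: pvIdxCuts (i + 1) x r

-- Successive differences starting from a.
def pvDiffs (a : Int) : List Int → List Int
  | [] => []
  | x :: r => (x - a) :: pvDiffs x r

theorem pvGroupLens_head (t : List Char) : ∀ (prev : Char) (n : Int),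
    ∃ h rest, pvGroupLens prev n t = h :: rest ∧ n ≤ h := by
  induction t with
  | nil => intro prev n; exact ⟨n, [], rfl, le_refl n⟩
  | cons x r ih =>
    intro prev n
    by_cases hx : x = prev
    · obtain ⟨h, rest, heq, hle⟩ := ih prev (n + 1)
      exact ⟨h, rest, by simp [pvGroupLens, hx, heq], by omega⟩
    · exact ⟨n, pvGroupLens x 1 r, by simp [pvGroupLens, hx], le_refl n⟩

-- Key invariant for A: the loop computes the running max over the run lengths.
theorem pvLoopA_eq_fold (t : List Char) : ∀ (prev : Char) (maxr cur : Int),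
    1 ≤ cur → cur ≤ maxr →
    pvLoopA prev maxr cur t = (pvGroupLens prev cur t).foldl max maxr := by
  induction t with
  | nil =>
    intro prev maxr cur h1 h2
    simp [pvLoopA, pvGroupLens]
    omega
  | cons x r ih =>
    intro prev maxr cur h1 h2
    by_cases hx : x = prev
    · subst hx
      simp only [pvLoopA, pvGroupLens, if_true]
      rw [ih x (max maxr (cur + 1)) (cur + 1) (by omega) (by omega)]
      obtain ⟨h, rest, heq, hle⟩ := pvGroupLens_head r x (cur + 1)
      rw [heq]
      simp only [List.foldl_cons]
      congr 1
      omega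
    · simp only [pvLoopA, pvGroupLens, if_neg hx]
      rw [ih x maxr 1 (le_refl 1) (by omega)]
      simp only [List.foldl_cons]
      congr 1
      omega

-- The index list of A's loop, mapped to the pairs (seq[i-1], seq[i]), is the list of adjacent
-- pairs of the character list.
theorem pvMap_pairs (c : Char) (t : List Char) :
    (PySem.List.pyRange 1 ((c :: t).length : Int) 1).map
        (fun i => (PySem.List.pyGetD (c :: t) (i - 1) ' ', PySem.List.pyGetD (c :: t) i ' '))
      = (c :: t).zip t := by
  apply List.ext_getElem
  · simp [PySem.List.length_pyRange_one]
  · intro k hk1 hk2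
    have hklen : k < t.length := by
      simpa [List.length_zip] using hk2
    simp only [List.getElem_map]
    rw [PySem.List.getElem_pyRange_one]
    have h1 : (1 : Int) + (k : Int) - 1 = ((k : Nat) : Int) := by omega
    have h2 : (1 : Int) + (k : Int) = (((k + 1 : Nat)) : Int) := by omega
    rw [h1, h2, PySem.List.pyGetD_natCast, PySem.List.pyGetD_natCast]
    have hk' : k < (c :: t).length := by simp; omega
    have hk1' : k + 1 < (c :: t).length := by simp; omega
    simp [List.getElem_zip, List.getD_eq_getElem?_getD, List.getElem?_eq_getElem hk',
      List.getElem?_eq_getElem hk1']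

-- A's fold over adjacent pairs equals the structural recursion pvLoopA.
theorem pvZipFold_eq_loopA (t : List Char) : ∀ (prev : Char) (maxr cur : Int),
    (((prev :: t).zip t).foldl
        (fun (st : Int × Int) p =>
          if p.2 = p.1 then (max st.1 (st.2 + 1), st.2 + 1) else (st.1, 1))
        (maxr, cur)).1
      = pvLoopA prev maxr cur t := by
  induction t with
  | nil => intro prev maxr cur; rfl
  | cons x r ih =>
    intro prev maxr cur
    by_cases hx : x = prev
    · simp [pvLoopA, hx, ih]
    · simp [pvLoopA, hx, ih]

-- B's filter over the index range is pvIdxCuts: if s.drop j = prev :: u (so s[j] = prev and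
-- u is the rest), the cut indices above j are pvIdxCuts (j+1) prev u.
theorem pvFilter_eq_idxCuts (s : List Char) (u : List Char) :
    ∀ (j : Nat) (prev : Char), s.drop j = prev :: u →
    (PySem.List.pyRange ((j : Int) + 1) (s.length : Int) 1).filter
        (fun i => PySem.List.pyGetD s i ' ' ≠ PySem.List.pyGetD s (i - 1) ' ')
      = pvIdxCuts ((j : Int) + 1) prev u := by
  induction u with
  | nil =>
    intro j prev hd
    have hj : j < s.length := by
      by_contra h
      rw [List.drop_eq_nil_of_le (by omega)] at hd
      exact absurd hd (by simp)
    have hlen : s.length = j + 1 := by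
      have := congrArg List.length hd
      simp [List.length_drop] at this
      omega
    rw [PySem.List.pyRange_one_eq_nil (by omega)]
    rfl
  | cons x r ih =>
    intro j prev hd
    have hj : j < s.length := by
      by_contra h
      rw [List.drop_eq_nil_of_le (by omega)] at hd
      exact absurd hd (by simp)
    have hlen : j + 1 < s.length := by
      have := congrArg List.length hd
      simp [List.length_drop] at this
      omega
    have hsj : s[j]'hj = prev := by
      have := congrArg (fun l => l.head?) hd
      simpa [List.head?_drop, List.getElem?_eq_getElem hj] using this
    have hsj1 : s[j+1]'hlen = x := by
      have hd1 : s.drop (j + 1) = x :: r := by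
        have := congrArg List.tail hd
        simpa [List.tail_drop] using this
      have := congrArg (fun l => l.head?) hd1
      simpa [List.head?_drop, List.getElem?_eq_getElem hlen] using this
    have hg1 : PySem.List.pyGetD s ((j : Int) + 1) ' ' = x := by
      have h2 : (j : Int) + 1 = (((j + 1 : Nat)) : Int) := by omega
      rw [h2, PySem.List.pyGetD_natCast]
      simp [List.getD_eq_getElem?_getD, List.getElem?_eq_getElem hlen, hsj1]
    have hg0 : PySem.List.pyGetD s ((j : Int) + 1 - 1) ' ' = prev := by
      have h1 : (j : Int) + 1 - 1 = ((j : Nat) : Int) := by omega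
      rw [h1, PySem.List.pyGetD_natCast]
      simp [List.getD_eq_getElem?_getD, List.getElem?_eq_getElem hj, hsj]
    have hd1 : s.drop (j + 1) = x :: r := by
      have := congrArg List.tail hd
      simpa [List.tail_drop] using this
    have hih := ih (j + 1) x hd1
    have hcast : ((j : Int) + 1) + 1 = (((j + 1 : Nat)) : Int) + 1 := by omega
    rw [PySem.List.pyRange_one_cons (by push_cast; omega)]
    rw [List.filter_cons, hg1, hg0]
    by_cases hx : x = prev
    · rw [if_neg (by simp [hx])]
      simp only [pvIdxCuts, if_pos hx]
      rw [hcast, hih]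
    · rw [if_pos (by simp [hx])]
      simp only [pvIdxCuts, if_neg hx]
      rw [hcast, hih]

-- zip-with-tail differences are pvDiffs.
theorem pvZip_diffs (l : List Int) : ∀ (a : Int),
    (((a :: l).zip l).map (fun p => p.2 - p.1)) = pvDiffs a l := by
  induction l with
  | nil => intro a; rfl
  | cons x r ih => intro a; simp [pvDiffs, ih x]

-- The differences of the cut positions are exactly the run lengths.
theorem pvDiffs_idxCuts (t : List Char) : ∀ (prev : Char) (i a : Int),
    pvDiffs a (pvIdxCuts i prev t ++ [i + t.length]) = pvGroupLens prev (i - a) t := by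
  induction t with
  | nil => intro prev i a; simp [pvIdxCuts, pvDiffs, pvGroupLens]
  | cons x r ih =>
    intro prev i a
    by_cases hx : x = prev
    · simp only [pvIdxCuts, if_pos hx, pvGroupLens]
      have := ih x (i + 1) a
      rw [show (i : Int) + ((x :: r).length : Int) = (i + 1) + (r.length : Int) by simp only [List.length_cons]; push_cast; omega]
      rw [this, hx]
      congr 1
      omega
    · simp only [pvIdxCuts, if_neg hx, pvGroupLens, List.cons_append, pvDiffs]
      have := ih x (i + 1) i
      rw [show (i : Int) + ((x :: r).length : Int) = (i + 1) + (r.length : Int) by simp only [List.length_cons]; push_cast; omega]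
      rw [this]
      simp

-- ===== VERDICT (by name: the statement is the Claim_ definition above) =====
theorem get_max_run_py_spec : Claim_equal_get_max_run_py := by
  intro seq _
  unfold Spec_get_max_run_py get_max_run_py get_max_run_py_alt
  cases hl : seq.toList with
  | nil =>
    have hs : seq = "" := by cases seq with | _ l => simpa using hl
    subst hs
    simp [PySem.Str.len_eq, PySem.List.pyRange_one_eq_nil, PySem.List.max?]
  | cons c t =>
    have hlen : PySem.Str.len seq = ((c :: t).length : Int) := by
      simp [PySem.Str.len_eq, hl]
    have hne : ¬ PySem.Str.len seq = 0 := by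
      rw [hlen]; simp only [List.length_cons]; push_cast; omega
    rw [if_neg hne, hlen]
    simp only [hl, hlen]
    -- A-side: rewrite the index fold into the run-length fold
    have hfold :
        ((PySem.List.pyRange 1 ((c :: t).length : Int) 1).foldl
            (fun (st : Int × Int) i =>
              if PySem.List.pyGetD (c :: t) i ' ' = PySem.List.pyGetD (c :: t) (i - 1) ' ' then
                (max st.1 (st.2 + 1), st.2 + 1)
              else (st.1, 1))
            (1, 1)).1
          = pvLoopA c 1 1 t := by
      rw [← pvZipFold_eq_loopA, ← pvMap_pairs c t, List.foldl_map]
    rw [hfold, pvLoopA_eq_fold t c 1 1 (le_refl 1) (le_refl 1)]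
    -- B-side: the cuts filter is pvIdxCuts, its differences are the run lengths
    have hcuts : (PySem.List.pyRange 1 (((c :: t).length : Nat) : Int) 1).filter
        (fun i => PySem.List.pyGetD (c :: t) i ' ' ≠ PySem.List.pyGetD (c :: t) (i - 1) ' ')
        = pvIdxCuts 1 c t := by
      have := pvFilter_eq_idxCuts (c :: t) t 0 c (by simp)
      simpa using this
    rw [hcuts]
    rw [show ((0 : Int) :: pvIdxCuts 1 c t ++ [(((c :: t).length : Nat) : Int)]).tail
        = pvIdxCuts 1 c t ++ [(((c :: t).length : Nat) : Int)] from rfl]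
    rw [List.cons_append]
    rw [pvZip_diffs (pvIdxCuts 1 c t ++ [(((c :: t).length : Nat) : Int)]) 0]
    have hnn : (((c :: t).length : Nat) : Int) = 1 + (t.length : Int) := by
      push_cast [List.length_cons]; ring
    rw [hnn, pvDiffs_idxCuts t c 1 0]
    have h10 : (1 : Int) - 0 = 1 := by norm_num
    rw [h10]
    obtain ⟨h, rest, heq, hle⟩ := pvGroupLens_head t c 1
    simp only [heq, PySem.List.max?_id_cons, List.foldl_cons]
    congr 1
    omega
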